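-- pv_equiv track=rewrite | github.com/sugipamo/oopstracker | src/oopstracker/function_group_clustering/metadata/insights.py | _categorize_sizes
-- ===== SOURCE A (Python) =====
-- from typing import Dict, Any, List, Optional, Tuple
--
-- def _categorize_sizes(sizes: List[int]) -> Dict[str, int]:
--     """Categorize cluster sizes."""
--     categories = {
--         'tiny': sum(1 for s in sizes if s < 3),
--         'small': sum(1 for s in sizes if 3 <= s < 10),
--         'medium': sum(1 for s in sizes if 10 <= s < 20),
--         'large': sum(1 for s in sizes if 20 <= s < 50),
--         'huge': sum(1 for s in sizes if s >= 50)
--     }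
--     return categories
-- ===== SOURCE B (Python) =====
-- def _categorize_sizes(sizes):
--     """Categorize cluster sizes in a single pass with an if/elif chain."""
--     categories = {'tiny': 0, 'small': 0, 'medium': 0, 'large': 0, 'huge': 0}
--     for s in sizes:
--         if s < 3:
--             categories['tiny'] += 1
--         elif s < 10:
--             categories['small'] += 1
--         elif s < 20:
--             categories['medium'] += 1
--         elif s < 50:
--             categories['large'] += 1
--         else:
--             categories['huge'] += 1
--     return categories
-- ===== Notes on version B (the rewrite author's own statement) =====
-- stated objective: faster
-- what changed: Replaced five separate full scans (one generator-sum per bucket) by a single pass that classifies each element with one if/elif chain into a pre-initialized ordered dict.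
import Mathlib
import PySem

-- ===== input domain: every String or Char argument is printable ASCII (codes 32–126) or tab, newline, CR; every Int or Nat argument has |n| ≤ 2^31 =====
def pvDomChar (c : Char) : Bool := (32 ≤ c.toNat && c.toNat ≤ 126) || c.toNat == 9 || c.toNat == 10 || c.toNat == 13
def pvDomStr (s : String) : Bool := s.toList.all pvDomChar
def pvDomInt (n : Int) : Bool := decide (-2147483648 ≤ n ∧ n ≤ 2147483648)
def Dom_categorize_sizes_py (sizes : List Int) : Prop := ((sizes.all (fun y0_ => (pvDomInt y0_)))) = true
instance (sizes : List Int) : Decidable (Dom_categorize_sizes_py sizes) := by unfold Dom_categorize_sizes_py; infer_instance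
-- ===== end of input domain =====

-- B replaces A's five full scans by one single classifying pass; header: one pass vs five.

-- ===== PORT A =====
-- each 'sum(1 for s in sizes if cond)' is a fold counting the condition
def categorize_sizes_py (sizes : List Int) : List (String × Int) :=
  [ ("tiny",   sizes.foldl (fun acc s => if s < 3 then acc + 1 else acc) 0),
    ("small",  sizes.foldl (fun acc s => if 3 ≤ s ∧ s < 10 then acc + 1 else acc) 0),
    ("medium", sizes.foldl (fun acc s => if 10 ≤ s ∧ s < 20 then acc + 1 else acc) 0),
    ("large",  sizes.foldl (fun acc s => if 20 ≤ s ∧ s < 50 then acc + 1 else acc) 0),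
    ("huge",   sizes.foldl (fun acc s => if 50 ≤ s then acc + 1 else acc) 0) ]

-- ===== PORT B =====
-- the loop state is the five counters of the pre-initialized dict, updated by one if/elif chain
def categorize_sizes_py_alt (sizes : List Int) : List (String × Int) :=
  let cs := sizes.foldl
    (fun (c : Int × Int × Int × Int × Int) (s : Int) =>
      let (t, sm, m, l, h) := c
      if s < 3 then (t + 1, sm, m, l, h)
      else if s < 10 then (t, sm + 1, m, l, h)
      else if s < 20 then (t, sm, m + 1, l, h)
      else if s < 50 then (t, sm, m, l + 1, h)
      else (t, sm, m, l, h + 1))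
    (0, 0, 0, 0, 0)
  [("tiny", cs.1), ("small", cs.2.1), ("medium", cs.2.2.1),
   ("large", cs.2.2.2.1), ("huge", cs.2.2.2.2)]

-- ===== PRECONDITION & SPEC =====
def Spec_categorize_sizes_py (sizes : List Int) (out : List (String × Int)) : Prop := out = categorize_sizes_py_alt sizes
instance (sizes : List Int) (out : List (String × Int)) : Decidable (Spec_categorize_sizes_py sizes out) := by unfold Spec_categorize_sizes_py; infer_instance

-- ===== CLAIM (what is proved, stated in full; the proofs are below) =====
def Claim_equal_categorize_sizes_py : Prop := ∀ (sizes : List Int), Dom_categorize_sizes_py sizes → Spec_categorize_sizes_py sizes (categorize_sizes_py sizes)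

-- ===== LEMMAS AND PROOFS =====

theorem count_foldl_shift (p : Int → Prop) [DecidablePred p] (xs : List Int) (a : Int) :
    xs.foldl (fun acc s => if p s then acc + 1 else acc) a
      = a + xs.foldl (fun acc s => if p s then acc + 1 else acc) 0 := by
  induction xs generalizing a with
  | nil => simp
  | cons x xs ih =>
    simp only [List.foldl_cons]
    rw [ih, ih (if p x then 0 + 1 else 0)]
    split <;> ring

theorem alt_fold_eq (xs : List Int) (t sm m l h : Int) :
    xs.foldl
      (fun (c : Int × Int × Int × Int × Int) (s : Int) =>
        let (t, sm, m, l, h) := c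
        if s < 3 then (t + 1, sm, m, l, h)
        else if s < 10 then (t, sm + 1, m, l, h)
        else if s < 20 then (t, sm, m + 1, l, h)
        else if s < 50 then (t, sm, m, l + 1, h)
        else (t, sm, m, l, h + 1))
      (t, sm, m, l, h)
    = (t + xs.foldl (fun acc s => if s < 3 then acc + 1 else acc) 0,
       sm + xs.foldl (fun acc s => if 3 ≤ s ∧ s < 10 then acc + 1 else acc) 0,
       m + xs.foldl (fun acc s => if 10 ≤ s ∧ s < 20 then acc + 1 else acc) 0,
       l + xs.foldl (fun acc s => if 20 ≤ s ∧ s < 50 then acc + 1 else acc) 0,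
       h + xs.foldl (fun acc s => if 50 ≤ s then acc + 1 else acc) 0) := by
  induction xs generalizing t sm m l h with
  | nil => simp
  | cons x xs ih =>
    simp only [List.foldl_cons]
    rw [count_foldl_shift (fun s => s < 3) xs,
        count_foldl_shift (fun s => 3 ≤ s ∧ s < 10) xs,
        count_foldl_shift (fun s => 10 ≤ s ∧ s < 20) xs,
        count_foldl_shift (fun s => 20 ≤ s ∧ s < 50) xs,
        count_foldl_shift (fun s => 50 ≤ s) xs]
    by_cases h3 : x < 3 <;> by_cases h10 : x < 10 <;> by_cases h20 : x < 20 <;>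
      by_cases h50 : x < 50 <;> first
      | omega
      | (simp only [h3, h10, h20, h50, if_true, if_false, and_true, and_false, ih, Prod.mk.injEq]
         split_ifs <;> first
           | (exfalso; omega)
           | refine ⟨by ring_nf, by ring_nf, by ring_nf, by ring_nf, by ring_nf⟩)

-- ===== VERDICT (by name: the statement is the Claim_ definition above) =====
theorem categorize_sizes_py_spec : Claim_equal_categorize_sizes_py := by
  intro sizes _
  unfold Spec_categorize_sizes_py categorize_sizes_py categorize_sizes_py_alt
  rw [alt_fold_eq]
  simp
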